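-- pv_equiv track=rewrite | github.com/dashabalashova/ImmLoom | src/immloom/components/build_msa_graphs.py | non_gap_segments
-- ===== SOURCE A (Python) =====
-- def non_gap_segments(seq: str) -> list[tuple[int, int]]:
--     """Return list of (start, length) segments where seq is not a gap."""
--     segments: list[tuple[int, int]] = []
--     in_segment = False
--     start = 0
--
--     for i, ch in enumerate(seq):
--         if ch != "-" and not in_segment:
--             start = i
--             in_segment = True
--         elif ch == "-" and in_segment:
--             segments.append((start, i - start))
--             in_segment = False
--
--     if in_segment:
--         segments.append((start, len(seq) - start))
--
--     return segments
-- ===== SOURCE B (Python) =====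
-- import re
--
-- def non_gap_segments(seq: str) -> list[tuple[int, int]]:
--     """Return list of (start, length) segments where seq is not a gap."""
--     return [(m.start(), m.end() - m.start()) for m in re.finditer(r"[^-]+", seq)]
-- ===== Notes on version B (the rewrite author's own statement) =====
-- stated objective: idiomatic
-- what changed: Replaced the hand-rolled in_segment/start state machine with a regex scan: re.finditer(r'[^-]+') yields the maximal non-gap runs directly, each mapped to (start, length).
import Mathlib
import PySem

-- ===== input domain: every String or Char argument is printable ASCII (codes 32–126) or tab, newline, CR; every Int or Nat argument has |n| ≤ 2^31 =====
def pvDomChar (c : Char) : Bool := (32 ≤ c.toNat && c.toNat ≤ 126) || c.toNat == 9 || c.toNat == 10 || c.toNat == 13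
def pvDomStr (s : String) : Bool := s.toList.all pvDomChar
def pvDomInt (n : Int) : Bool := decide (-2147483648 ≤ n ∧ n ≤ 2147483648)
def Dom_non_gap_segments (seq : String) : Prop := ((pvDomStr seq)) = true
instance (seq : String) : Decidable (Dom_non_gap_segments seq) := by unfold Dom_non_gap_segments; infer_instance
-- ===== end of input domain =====

-- B replaces A's explicit in_segment/start state machine with a direct scan for
-- maximal non-gap runs (re.finditer(r"[^-]+") in Python): idiomatic, same cost.

-- ===== PORT A =====
-- A's loop: enumerate the characters, thread (segments, in_segment, start); final append if still inside.
def non_gap_segments (seq : String) : List (Int × Int) :=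
  let cs := seq.toList
  let st := (PySem.List.enumerate cs).foldl
    (fun (s : List (Int × Int) × Bool × Int) (p : Int × Char) =>
      if p.2 ≠ '-' ∧ ¬ s.2.1 then (s.1, true, p.1)
      else if p.2 = '-' ∧ s.2.1 then (s.1 ++ [(s.2.2, p.1 - s.2.2)], false, s.2.2)
      else s)
    ([], false, 0)
  if st.2.1 then st.1 ++ [(st.2.2, (cs.length : Int) - st.2.2)] else st.1

-- ===== PORT B =====
-- B's regex scan for matches of [^-]+: skip gaps; at a non-gap character the match is
-- the maximal run starting there; emit (start, length) and continue after the run.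
def findRuns : List Char → Int → List (Int × Int)
  | [], _ => []
  | c :: rest, i =>
    if c = '-' then findRuns rest (i + 1)
    else
      let run := rest.takeWhile (· ≠ '-')
      (i, 1 + (run.length : Int)) :: findRuns (rest.dropWhile (· ≠ '-')) (i + 1 + run.length)
  termination_by cs _ => cs.length
  decreasing_by
    · simp
    · exact Nat.lt_succ_of_le (List.length_dropWhile_le _ _)

def non_gap_segments_alt (seq : String) : List (Int × Int) :=
  findRuns seq.toList 0

-- ===== PRECONDITION & SPEC =====
def Spec_non_gap_segments (seq : String) (out : List (Int × Int)) : Prop := out = non_gap_segments_alt seq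
instance (seq : String) (out : List (Int × Int)) : Decidable (Spec_non_gap_segments seq out) := by unfold Spec_non_gap_segments; infer_instance

-- ===== CLAIM (what is proved, stated in full; the proofs are below) =====
def Claim_equal_non_gap_segments : Prop := ∀ (seq : String), Dom_non_gap_segments seq → Spec_non_gap_segments seq (non_gap_segments seq)

-- ===== LEMMAS AND PROOFS =====

-- proof-only names for A's loop step and final flush (definitionally equal to what the port inlines)
def aStep (s : List (Int × Int) × Bool × Int) (p : Int × Char) : List (Int × Int) × Bool × Int :=
  if p.2 ≠ '-' ∧ ¬ s.2.1 then (s.1, true, p.1)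
  else if p.2 = '-' ∧ s.2.1 then (s.1 ++ [(s.2.2, p.1 - s.2.2)], false, s.2.2)
  else s

def aFinish (st : List (Int × Int) × Bool × Int) (n : Int) : List (Int × Int) :=
  if st.2.1 then st.1 ++ [(st.2.2, n - st.2.2)] else st.1

-- "rest of A's computation" from state (b, start) at index i over the remaining characters,
-- including the final flush; the output is produced positionally (the accumulator is factored out).
def aRest : List Char → Int → Bool → Int → List (Int × Int)
  | [], i, b, start => if b then [(start, i - start)] else []
  | c :: rest, i, b, start =>
    if c ≠ '-' ∧ ¬ b then aRest rest (i + 1) true i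
    else if c = '-' ∧ b then (start, i - start) :: aRest rest (i + 1) false start
    else aRest rest (i + 1) b start

-- A's foldl from any accumulator/state, plus the final flush, equals acc ++ aRest.
theorem foldl_eq_aRest (cs : List Char) :
    ∀ (acc : List (Int × Int)) (i start : Int) (b : Bool),
    aFinish ((PySem.List.enumerate cs i).foldl aStep (acc, b, start)) (i + (cs.length : Int))
      = acc ++ aRest cs i b start := by
  induction cs with
  | nil =>
    intro acc i start b
    cases b <;> simp [PySem.List.enumerate_nil, aRest, aFinish]
  | cons c rest ih =>
    intro acc i start b
    rw [PySem.List.enumerate_cons, List.foldl_cons,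
        show i + (((c :: rest).length : Int)) = (i + 1) + (rest.length : Int) by
          push_cast [List.length_cons]; ring]
    by_cases hc : c = '-' <;> cases b
    · rw [show aStep (acc, false, start) (i, c) = (acc, false, start) by simp [aStep, hc],
          show aRest (c :: rest) i false start = aRest rest (i + 1) false start by
            simp [aRest, hc]]
      exact ih acc (i + 1) start false
    · rw [show aStep (acc, true, start) (i, c) = (acc ++ [(start, i - start)], false, start) by
            simp [aStep, hc],
          show aRest (c :: rest) i true start
              = (start, i - start) :: aRest rest (i + 1) false start by simp [aRest, hc]]
      rw [ih (acc ++ [(start, i - start)]) (i + 1) start false]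
      simp
    · rw [show aStep (acc, false, start) (i, c) = (acc, true, i) by simp [aStep, hc],
          show aRest (c :: rest) i false start = aRest rest (i + 1) true i by
            simp [aRest, hc]]
      exact ih acc (i + 1) i true
    · rw [show aStep (acc, true, start) (i, c) = (acc, true, start) by simp [aStep, hc],
          show aRest (c :: rest) i true start = aRest rest (i + 1) true start by
            simp [aRest, hc]]
      exact ih acc (i + 1) start true

-- inside a run, aRest emits (start, i + |takeWhile| - start) and resumes as findRuns after the
-- run; outside a run, aRest is exactly findRuns.
theorem aRest_eq_findRuns (cs : List Char) : ∀ (i start : Int),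
    aRest cs i true start =
      (start, (i + ((cs.takeWhile (· ≠ '-')).length : Int)) - start)
        :: findRuns (cs.dropWhile (· ≠ '-')) (i + ((cs.takeWhile (· ≠ '-')).length : Int)) ∧
    aRest cs i false start = findRuns cs i := by
  induction cs with
  | nil => intro i start; simp [aRest, findRuns]
  | cons c rest ih =>
    intro i start
    by_cases hc : c = '-'
    · refine ⟨?_, ?_⟩
      · rw [show aRest (c :: rest) i true start
              = (start, i - start) :: aRest rest (i + 1) false start by simp [aRest, hc],
            (ih (i + 1) start).2]
        simp [hc, findRuns]
      · rw [show aRest (c :: rest) i false start = aRest rest (i + 1) false start by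
              simp [aRest, hc],
            (ih (i + 1) start).2,
            show findRuns (c :: rest) i = findRuns rest (i + 1) by simp [findRuns, hc]]
    · have harith : i + 1 + ((rest.takeWhile (· ≠ '-')).length : Int)
          = i + (((c :: rest).takeWhile (· ≠ '-')).length : Int) := by
        simp [hc]; ring
      refine ⟨?_, ?_⟩
      · rw [show aRest (c :: rest) i true start = aRest rest (i + 1) true start by
              simp [aRest, hc],
            (ih (i + 1) start).1, harith,
            show (c :: rest).dropWhile (· ≠ '-') = rest.dropWhile (· ≠ '-') by
              simp [hc]]
      · rw [show aRest (c :: rest) i false start = aRest rest (i + 1) true i by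
              simp [aRest, hc],
            (ih (i + 1) i).1,
            show findRuns (c :: rest) i
              = (i, 1 + ((rest.takeWhile (· ≠ '-')).length : Int))
                  :: findRuns (rest.dropWhile (· ≠ '-'))
                      (i + 1 + ((rest.takeWhile (· ≠ '-')).length : Int)) by
              simp [findRuns, hc]]
        rw [show i + 1 + ((rest.takeWhile (· ≠ '-')).length : Int) - i
            = 1 + ((rest.takeWhile (· ≠ '-')).length : Int) by ring]

-- ===== VERDICT (by name: the statement is the Claim_ definition above) =====
theorem non_gap_segments_spec : Claim_equal_non_gap_segments := by
  intro seq _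
  unfold Spec_non_gap_segments non_gap_segments non_gap_segments_alt
  have h := foldl_eq_aRest seq.toList [] 0 0 false
  rw [zero_add, List.nil_append] at h
  exact h.trans (aRest_eq_findRuns seq.toList 0 0).2
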